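-- pv_equiv track=rewrite | github.com/adam-harmasz/gomoku_v_0_2 | src/core/utils.py | get_game_record_from_list
-- ===== SOURCE A (Python) =====
-- def get_game_record_from_list(game_record_list):
--     """
--     Function extracting game record from a list to make it
--     a list o tuples with a two values, number of move and coordinate
--     """
--
--     # Removing all statements from the list which aren't moves coordinates
--     game_record_list_with_only_moves = []
--     counter = 1
--     for i, v in enumerate(game_record_list):
--         if i == 0 or i % 3 == 0:
--             pass
--         elif v == "white" or v == "black" or v == "--":
--             pass
--         else:
--             game_record_list_with_only_moves.append(v)
--             counter += 1
--     return game_record_list_with_only_moves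
-- ===== SOURCE B (Python) =====
-- def get_game_record_from_list(game_record_list):
--     """Chunked traversal: each chunk of 3 starts with a move number; keep the
--     chunk's other entries unless they are player/placeholder markers."""
--     moves = []
--     for start in range(0, len(game_record_list), 3):
--         for v in game_record_list[start + 1:start + 3]:
--             if v not in ("white", "black", "--"):
--                 moves.append(v)
--     return moves
-- ===== Notes on version B (the rewrite author's own statement) =====
-- stated objective: simpler
-- what changed: Replaced the enumerate loop with its per-index modulo test and unused counter by a recursion over 3-element chunks that slices off each chunk's move number and filters the rest.
import Mathlib
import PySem

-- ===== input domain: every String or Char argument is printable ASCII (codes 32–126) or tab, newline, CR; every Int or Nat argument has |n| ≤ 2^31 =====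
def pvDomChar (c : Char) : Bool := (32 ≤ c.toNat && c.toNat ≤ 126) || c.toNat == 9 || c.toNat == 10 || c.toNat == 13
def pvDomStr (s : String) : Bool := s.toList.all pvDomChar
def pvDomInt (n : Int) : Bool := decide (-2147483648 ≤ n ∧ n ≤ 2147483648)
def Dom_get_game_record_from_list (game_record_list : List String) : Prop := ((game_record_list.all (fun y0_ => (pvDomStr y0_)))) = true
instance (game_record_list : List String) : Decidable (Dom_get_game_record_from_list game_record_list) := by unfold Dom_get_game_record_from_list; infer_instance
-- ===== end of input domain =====

-- B replaces A's enumerate loop (per-index modulo test, unused counter) by a loop over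
-- chunk starts range(0, len, 3) that slices past each chunk's move number; objective: simpler.

-- ===== PORT A =====
-- step of A's for-loop: state is (game_record_list_with_only_moves, counter)
def pvAStep (st : List String × Int) (p : Int × String) : List String × Int :=
  if p.1 == 0 || PySem.Int.mod p.1 3 == 0 then st
  else if p.2 == "white" || p.2 == "black" || p.2 == "--" then st
  else (st.1 ++ [p.2], st.2 + 1)

def get_game_record_from_list (game_record_list : List String) : List String :=
  ((PySem.List.enumerate game_record_list 0).foldl pvAStep ([], 1)).1

-- ===== PORT B =====
-- v not in ("white", "black", "--")
def pvKeep (v : String) : Bool := !(v == "white" || v == "black" || v == "--")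

-- inner 'for v in lst[start+1:start+3]: if keep: append' = append the kept slice elements
def get_game_record_from_list_alt (game_record_list : List String) : List String :=
  (PySem.List.pyRange 0 (game_record_list.length : Int) 3).foldl
    (fun moves start =>
      moves ++ (PySem.List.slice game_record_list (some (start + 1)) (some (start + 3))).filter pvKeep)
    []

-- ===== PRECONDITION & SPEC =====
def Spec_get_game_record_from_list (game_record_list : List String) (out : List String) : Prop := out = get_game_record_from_list_alt game_record_list
instance (game_record_list : List String) (out : List String) : Decidable (Spec_get_game_record_from_list game_record_list out) := by unfold Spec_get_game_record_from_list; infer_instance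

-- ===== CLAIM (what is proved, stated in full; the proofs are below) =====
def Claim_equal_get_game_record_from_list : Prop := ∀ (game_record_list : List String), Dom_get_game_record_from_list game_record_list → Spec_get_game_record_from_list game_record_list (get_game_record_from_list game_record_list)

-- ===== LEMMAS AND PROOFS =====

-- proof-side bridge: the common chunk-recursive characterisation of both ports
def pvChunks : List String → List String
  | [] => []
  | _ :: rest => (rest.take 2).filter pvKeep ++ pvChunks (rest.drop 2)
  termination_by l => l.length
  decreasing_by simp

theorem pvAStep_skip (st : List String × Int) (i : Int) (v : String)
    (h : (i == 0 || PySem.Int.mod i 3 == 0) = true) : pvAStep st (i, v) = st := by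
  simp only [pvAStep]; rw [if_pos h]

theorem pvAStep_keep (st : List String × Int) (i : Int) (v : String)
    (h : (i == 0 || PySem.Int.mod i 3 == 0) = false) :
    (pvAStep st (i, v)).1 = st.1 ++ if pvKeep v then [v] else [] := by
  simp only [pvAStep, h, Bool.false_eq_true, if_false, pvKeep]
  by_cases hv : (v == "white" || v == "black" || v == "--") = true <;> simp [hv]

theorem pvMod3_succ (m : Nat) (k : Int) (h1 : 1 ≤ k) (h2 : k ≤ 2) :
    ((3 * (m : Int) + k == 0 || PySem.Int.mod (3 * (m : Int) + k) 3 == 0)) = false := by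
  have hk : k = 1 ∨ k = 2 := by omega
  simp only [PySem.Int.mod]
  rcases hk with rfl | rfl <;> simp <;> omega

theorem pvAux : ∀ (l : List String) (m : Nat) (acc : List String) (c : Int),
    ((PySem.List.enumerate l (3 * (m : Int))).foldl pvAStep (acc, c)).1
      = acc ++ pvChunks l := by
  intro l
  fun_induction pvChunks l with
  | case1 =>
      intro m acc c
      simp [PySem.List.enumerate_nil]
  | case2 x rest ih =>
      intro m acc c
      rw [PySem.List.enumerate_cons, List.foldl_cons,
          pvAStep_skip _ _ _ (by simp [PySem.Int.mod])]
      match rest with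
      | [] =>
          simp [PySem.List.enumerate_nil, pvChunks]
      | [b] =>
          rw [PySem.List.enumerate_cons, PySem.List.enumerate_nil]
          simp only [List.foldl_cons, List.foldl_nil]
          have h := pvAStep_keep (acc, c) (3 * (m : Int) + 1) b (pvMod3_succ m 1 le_rfl (by norm_num))
          by_cases hb : pvKeep b = true <;>
            simp_all [pvAStep, pvChunks, pvKeep, PySem.Int.mod]
      | b :: cv :: rest' =>
          rw [PySem.List.enumerate_cons, PySem.List.enumerate_cons]
          simp only [List.foldl_cons]
          -- evaluate the two kept-index steps, then apply the IH at the next chunk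
          obtain ⟨acc1, c1, h1⟩ : ∃ a1 c1, pvAStep (acc, c) (3 * (m : Int) + 1, b) = (a1, c1) :=
            ⟨_, _, rfl⟩
          obtain ⟨acc2, c2, h2⟩ : ∃ a2 c2, pvAStep (acc1, c1) (3 * (m : Int) + 1 + 1, cv) = (a2, c2) :=
            ⟨_, _, rfl⟩
          have ha1 : acc1 = acc ++ if pvKeep b then [b] else [] := by
            have := pvAStep_keep (acc, c) (3 * (m : Int) + 1) b (pvMod3_succ m 1 le_rfl (by norm_num))
            rw [h1] at this; exact this
          have ha2 : acc2 = acc1 ++ if pvKeep cv then [cv] else [] := by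
            have := pvAStep_keep (acc1, c1) (3 * (m : Int) + 2) cv (pvMod3_succ m 2 (by norm_num) le_rfl)
            rw [show (3 : Int) * (m : Int) + 2 = 3 * (m : Int) + 1 + 1 by ring, h2] at this
            exact this
          rw [h1, h2]
          have hnext : (3 : Int) * (m : Int) + 1 + 1 + 1 = 3 * ((m + 1 : Nat) : Int) := by
            push_cast; ring
          rw [hnext]
          have ihr := ih (m + 1) acc2 c2
          simp only [List.drop_succ_cons, List.drop_zero] at ihr ⊢
          rw [ihr, ha2, ha1]
          by_cases hkb : pvKeep b = true <;> by_cases hkc : pvKeep cv = true <;>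
            simp [hkb, hkc, List.filter]

-- range(a, b, 3) peels its first element when a < b
theorem pvRange3_cons (a b : Int) (h : a < b) :
    PySem.List.pyRange a b 3 = a :: PySem.List.pyRange (a + 3) b 3 := by
  rw [PySem.List.pyRange_of_pos a b (by norm_num),
      PySem.List.pyRange_of_pos (a + 3) b (by norm_num)]
  by_cases h3 : a + 3 < b
  · have hq : (b - a + 3 - 1) / 3 = (b - (a + 3) + 3 - 1) / 3 + 1 := by omega
    have ht : ((b - (a + 3) + 3 - 1) / 3 + 1).toNat = ((b - (a + 3) + 3 - 1) / 3).toNat + 1 := by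
      omega
    rw [if_pos h, if_pos h3, hq, ht, List.range_succ_eq_map, List.map_cons, List.map_map]
    refine congrArg₂ _ (by ring) (List.map_congr_left ?_)
    intro k _
    simp only [Function.comp]
    push_cast; ring
  · have hq : (b - a + 3 - 1) / 3 = 1 := by omega
    rw [if_pos h, if_neg h3, hq]
    simp

theorem pvBAux (l : List String) : ∀ (t : List String) (j : Nat) (acc : List String),
    t = l.drop (3 * j) →
    (PySem.List.pyRange ((3 * j : Nat) : Int) (l.length : Int) 3).foldl
      (fun moves start =>
        moves ++ (PySem.List.slice l (some (start + 1)) (some (start + 3))).filter pvKeep)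
      acc
      = acc ++ pvChunks t := by
  intro t
  fun_induction pvChunks t with
  | case1 =>
      intro j acc ht
      have hge : l.length ≤ 3 * j := by
        have := congrArg List.length ht.symm
        simp [List.length_drop] at this
        omega
      rw [PySem.List.pyRange_of_pos _ _ (by norm_num), if_neg (by exact_mod_cast not_lt.mpr hge)]
      simp
  | case2 x rest ih =>
      intro j acc ht
      have hlt : 3 * j < l.length := by
        by_contra hge
        rw [List.drop_eq_nil_of_le (by omega)] at ht
        exact List.cons_ne_nil _ _ ht
      have hslice : PySem.List.slice l (some (((3 * j : Nat) : Int) + 1)) (some (((3 * j : Nat) : Int) + 3))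
          = rest.take 2 := by
        have h1 : ((3 * j : Nat) : Int) + 1 = ((3 * j + 1 : Nat) : Int) := by push_cast; ring
        have h3 : ((3 * j : Nat) : Int) + 3 = ((3 * j + 3 : Nat) : Int) := by push_cast; ring
        rw [h1, h3, PySem.List.slice_natCast]
        have htl : l.drop (3 * j + 1) = rest := by
          rw [← List.tail_drop, ← ht]; rfl
        rw [show 3 * j + 3 - (3 * j + 1) = 2 by omega, htl]
      have hdrop : rest.drop 2 = l.drop (3 * (j + 1)) := by
        have h33 : (l.drop (3 * j)).drop 3 = l.drop (3 * (j + 1)) := by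
          rw [List.drop_drop]; congr 1
        rw [← h33, ← ht]; rfl
      have hnext : ((3 * j : Nat) : Int) + 3 = ((3 * (j + 1) : Nat) : Int) := by push_cast; ring
      rw [pvRange3_cons _ _ (by exact_mod_cast hlt), List.foldl_cons]
      simp only [hslice]
      rw [hnext, ih (j + 1) (acc ++ (rest.take 2).filter pvKeep) hdrop, hdrop]
      simp

-- ===== VERDICT (by name: the statement is the Claim_ definition above) =====
theorem get_game_record_from_list_spec : Claim_equal_get_game_record_from_list := by
  intro l _
  show get_game_record_from_list l = get_game_record_from_list_alt l
  have hA := pvAux l 0 [] 1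
  have hB := pvBAux l l 0 [] (by simp)
  simp only [Nat.cast_zero, mul_zero] at hA hB
  rw [get_game_record_from_list, get_game_record_from_list_alt, hA]
  exact hB.symm
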